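-- pv_equiv track=rewrite | github.com/advaithasabnis/advent-of-code | advent_of_code/year2024/day20/shared.py | build_offsets
-- ===== SOURCE A (Python) =====
-- Pos = tuple[int, int]
--
-- def build_offsets(min_dist: int, max_dist: int) -> list[Pos]:
--     """
--     Returns all (dr, dc) pairs for which the Manhattan distance
--     min_dist <= |dr| + |dc| <= max_dist.
--     """
--     offsets = []
--     for dr in range(-max_dist, max_dist + 1):
--         for dc in range(-max_dist, max_dist + 1):
--             manhattan = abs(dr) + abs(dc)
--             if min_dist <= manhattan <= max_dist:
--                 offsets.append((dr, dc))
--     return offsets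
-- ===== SOURCE B (Python) =====
-- def build_offsets(min_dist: int, max_dist: int) -> list:
--     """
--     Returns all (dr, dc) pairs for which the Manhattan distance
--     min_dist <= |dr| + |dc| <= max_dist.
--
--     Per row dr the valid |dc| interval [lo, hi] is computed directly and
--     emitted as two ranges, instead of testing every dc in the full box.
--     """
--     offsets = []
--     for dr in range(-max_dist, max_dist + 1):
--         a = abs(dr)
--         lo = max(0, min_dist - a)
--         hi = max_dist - a
--         if hi < lo:
--             continue
--         for dc in range(-hi, -lo + 1):
--             offsets.append((dr, dc))
--         for dc in range(lo if lo > 0 else 1, hi + 1):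
--             offsets.append((dr, dc))
--     return offsets
-- ===== Notes on version B (the rewrite author's own statement) =====
-- stated objective: faster
-- what changed: Instead of scanning the full (2*max_dist+1)^2 box and testing each cell's Manhattan distance, B computes per row dr the valid |dc| interval [lo,hi] in closed form and emits exactly the two dc ranges [-hi,-lo] and [max(lo,1),hi], skipping empty rows.
import Mathlib
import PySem

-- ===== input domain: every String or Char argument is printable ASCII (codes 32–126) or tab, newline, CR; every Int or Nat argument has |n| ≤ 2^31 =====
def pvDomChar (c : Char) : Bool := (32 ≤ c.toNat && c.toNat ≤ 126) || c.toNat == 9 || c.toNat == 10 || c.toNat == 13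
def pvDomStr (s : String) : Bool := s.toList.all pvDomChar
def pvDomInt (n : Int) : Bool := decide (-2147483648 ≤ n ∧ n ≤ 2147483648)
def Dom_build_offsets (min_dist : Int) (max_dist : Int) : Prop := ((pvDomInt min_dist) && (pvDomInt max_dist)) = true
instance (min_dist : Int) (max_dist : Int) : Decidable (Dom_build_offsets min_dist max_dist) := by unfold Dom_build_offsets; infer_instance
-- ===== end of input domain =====

-- B computes each row's valid |dc| interval [lo, hi] directly and emits it as two
-- ranges instead of testing every dc in the full box (alternative decomposition).

-- ===== PORT A =====
def build_offsets (min_dist : Int) (max_dist : Int) : List (Int × Int) :=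
  (PySem.List.pyRange (-max_dist) (max_dist + 1)).foldl (fun offsets dr =>
    (PySem.List.pyRange (-max_dist) (max_dist + 1)).foldl (fun offsets dc =>
      let manhattan := |dr| + |dc|
      if min_dist ≤ manhattan ∧ manhattan ≤ max_dist then offsets ++ [(dr, dc)]
      else offsets) offsets) []

-- ===== PORT B =====
def build_offsets_alt (min_dist : Int) (max_dist : Int) : List (Int × Int) :=
  (PySem.List.pyRange (-max_dist) (max_dist + 1)).foldl (fun offsets dr =>
    let a := |dr|
    let lo := max 0 (min_dist - a)
    let hi := max_dist - a
    if hi < lo then offsets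
    else
      let offsets := (PySem.List.pyRange (-hi) (-lo + 1)).foldl
        (fun acc dc => acc ++ [(dr, dc)]) offsets
      (PySem.List.pyRange (if lo > 0 then lo else 1) (hi + 1)).foldl
        (fun acc dc => acc ++ [(dr, dc)]) offsets) []

-- ===== PRECONDITION & SPEC =====
def Spec_build_offsets (min_dist : Int) (max_dist : Int) (out : List (Int × Int)) : Prop := out = build_offsets_alt min_dist max_dist
instance (min_dist : Int) (max_dist : Int) (out : List (Int × Int)) : Decidable (Spec_build_offsets min_dist max_dist out) := by unfold Spec_build_offsets; infer_instance

-- ===== CLAIM (what is proved, stated in full; the proofs are below) =====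
def Claim_equal_build_offsets : Prop := ∀ (min_dist : Int) (max_dist : Int), Dom_build_offsets min_dist max_dist → Spec_build_offsets min_dist max_dist (build_offsets min_dist max_dist)

-- ===== LEMMAS AND PROOFS =====

-- The filtered symmetric row equals the two directly-computed ranges.
theorem row_filter (mn M a : Int) (h0 : 0 ≤ a) (h1 : a ≤ M) :
    (PySem.List.pyRange (-M) (M + 1)).filter
      (fun dc => decide (mn ≤ a + |dc| ∧ a + |dc| ≤ M)) =
    if M - a < max 0 (mn - a) then []
    else PySem.List.pyRange (-(M - a)) (-(max 0 (mn - a)) + 1) ++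
         PySem.List.pyRange (if max 0 (mn - a) > 0 then max 0 (mn - a) else 1) ((M - a) + 1) := by
  set lo := max 0 (mn - a) with hlo
  set hi := M - a with hhi
  have hlo0 : 0 ≤ lo := le_max_left _ _
  have hlo' : mn - a ≤ lo := le_max_right _ _
  rcases lt_or_ge hi lo with hcase | hcase
  · -- hi < lo : no dc qualifies
    rw [if_pos hcase]
    apply List.filter_eq_nil_iff.mpr
    intro dc _ hcontra
    have hP := of_decide_eq_true hcontra
    rcases abs_cases dc with ⟨h2, h3⟩ | ⟨h2, h3⟩ <;> rw [h2] at hP <;> omega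
  · -- lo ≤ hi : split the range at -hi, -lo+1, s, hi+1
    rw [if_neg (not_lt.mpr hcase)]
    set s : Int := if lo > 0 then lo else 1 with hs
    have hs1 : -lo + 1 ≤ s ∧ s ≤ hi + 1 ∧ 1 ≤ s ∧ lo ≤ s ∧ s ≤ max lo 1 := by
      rw [hs]; split_ifs <;> omega
    rw [PySem.List.pyRange_one_append (-M) (-hi) (M+1) (by omega) (by omega),
        PySem.List.pyRange_one_append (-hi) (-lo+1) (M+1) (by omega) (by omega),
        PySem.List.pyRange_one_append (-lo+1) s (M+1) (by omega) (by omega),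
        PySem.List.pyRange_one_append s (hi+1) (M+1) (by omega) (by omega)]
    simp only [List.filter_append]
    have seg1 : (PySem.List.pyRange (-M) (-hi)).filter
        (fun dc => decide (mn ≤ a + |dc| ∧ a + |dc| ≤ M)) = [] := by
      apply List.filter_eq_nil_iff.mpr
      intro dc hdc hcontra
      obtain ⟨hd1, hd2⟩ := PySem.List.mem_pyRange_one.mp hdc
      have hP := of_decide_eq_true hcontra
      rcases abs_cases dc with ⟨h2, h3⟩ | ⟨h2, h3⟩ <;> rw [h2] at hP <;> omega
    have seg2 : (PySem.List.pyRange (-hi) (-lo+1)).filter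
        (fun dc => decide (mn ≤ a + |dc| ∧ a + |dc| ≤ M)) =
        PySem.List.pyRange (-hi) (-lo+1) := by
      apply List.filter_eq_self.mpr
      intro dc hdc
      obtain ⟨hd1, hd2⟩ := PySem.List.mem_pyRange_one.mp hdc
      exact decide_eq_true (by rcases abs_cases dc with ⟨h2, h3⟩ | ⟨h2, h3⟩ <;> rw [h2] <;> omega)
    have seg3 : (PySem.List.pyRange (-lo+1) s).filter
        (fun dc => decide (mn ≤ a + |dc| ∧ a + |dc| ≤ M)) = [] := by
      apply List.filter_eq_nil_iff.mpr
      intro dc hdc hcontra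
      obtain ⟨hd1, hd2⟩ := PySem.List.mem_pyRange_one.mp hdc
      have hP := of_decide_eq_true hcontra
      have hsv : s ≤ max lo 1 := hs1.2.2.2.2
      rcases abs_cases dc with ⟨h2, h3⟩ | ⟨h2, h3⟩ <;> rw [h2] at hP <;> omega
    have seg4 : (PySem.List.pyRange s (hi+1)).filter
        (fun dc => decide (mn ≤ a + |dc| ∧ a + |dc| ≤ M)) =
        PySem.List.pyRange s (hi+1) := by
      apply List.filter_eq_self.mpr
      intro dc hdc
      obtain ⟨hd1, hd2⟩ := PySem.List.mem_pyRange_one.mp hdc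
      have hsv : lo ≤ s := hs1.2.2.2.1
      have hs2 : 1 ≤ s := hs1.2.2.1
      exact decide_eq_true (by rcases abs_cases dc with ⟨h2, h3⟩ | ⟨h2, h3⟩ <;> rw [h2] <;> omega)
    have seg5 : (PySem.List.pyRange (hi+1) (M+1)).filter
        (fun dc => decide (mn ≤ a + |dc| ∧ a + |dc| ≤ M)) = [] := by
      apply List.filter_eq_nil_iff.mpr
      intro dc hdc hcontra
      obtain ⟨hd1, hd2⟩ := PySem.List.mem_pyRange_one.mp hdc
      have hP := of_decide_eq_true hcontra
      rcases abs_cases dc with ⟨h2, h3⟩ | ⟨h2, h3⟩ <;> rw [h2] at hP <;> omega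
    rw [seg1, seg2, seg3, seg4, seg5]
    simp

-- ===== VERDICT (by name: the statement is the Claim_ definition above) =====
theorem build_offsets_spec : Claim_equal_build_offsets := by
  intro mn M _
  unfold Spec_build_offsets build_offsets build_offsets_alt
  apply PySem.List.foldl_congr_mem
  intro acc dr hdr
  obtain ⟨hd1, hd2⟩ := PySem.List.mem_pyRange_one.mp hdr
  have ha : 0 ≤ |dr| ∧ |dr| ≤ M := by
    rcases abs_cases dr with ⟨h2, h3⟩ | ⟨h2, h3⟩ <;> rw [h2] <;> omega
  show _ = if M - |dr| < max 0 (mn - |dr|) then acc else _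
  rw [PySem.List.foldl_append_ite (fun dc => mn ≤ |dr| + |dc| ∧ |dr| + |dc| ≤ M)
        (fun dc => (dr, dc)),
      row_filter mn M |dr| ha.1 ha.2]
  by_cases hcase : M - |dr| < max 0 (mn - |dr|)
  · rw [if_pos hcase, if_pos hcase]
    simp
  · rw [if_neg hcase, if_neg hcase,
        PySem.List.foldl_append_singleton_eq_map (fun dc => (dr, dc)),
        PySem.List.foldl_append_singleton_eq_map (fun dc => (dr, dc))]
    simp [List.append_assoc]
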